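-- pv_equiv track=rewrite | github.com/willizdev/compuba | Algoritmos/Introducción a la Programación/Python/Parciales/Simulacro/solucion_respuesta.py | maxima_cantidad_primos
-- ===== SOURCE A (Python) =====
-- def es_primo(n: int) -> bool:
--     if n < 2:
--         return False
--     for i in range(2, n):
--         if n % i == 0:
--             return False
--     return True
--
-- def maximo(s: list[int]) -> int:
--     """
--     Recibimos una lista de enteros
--     Devolvemos el maximo de la lista
--     requiere |s| > 0
--     """
--
--     maximo:int = s[0]
--     for elem in s:
--         if elem > maximo:
--             maximo = elem
--     return maximo
--
-- def maxima_cantidad_primos( A: list[list[int]]) -> int: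
--     """
--     Todas las columnas de A tienen a lo sumo res elementos que son primos
--     Existe alguna columna c en A para la cual res de sus elementos son primos
--
--     Es todas las columnas van a tener k primos <= res
--     y una columna va a tener k = res
--
--     Es un problema de 1) Contar cantidad de numeros primos en una columna
--                       2) Ver el maximo de todos esos
--     """
--     lista_de_primos: list[int] = []
--     largo_fila: int = len(A)
--
--     # si la matriz está vacía no devuelve nada
--     if largo_fila == 0:
--         return 0
--
--     largo_columna: int = len(A[0])
--
--     for j in range(largo_columna):
--         cant_primos_en_columna = 0
--         for i in range(largo_fila):
--             if es_primo(A[i][j]):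
--                cant_primos_en_columna+=1
--         lista_de_primos.append(cant_primos_en_columna)
--
--     return maximo(lista_de_primos)
-- ===== SOURCE B (Python) =====
-- def es_primo(n: int) -> bool:
--     if n < 2:
--         return False
--     i = 2
--     while i * i <= n:
--         if n % i == 0:
--             return False
--         i += 1
--     return True
--
-- def maxima_cantidad_primos(A: list[list[int]]) -> int:
--     if len(A) == 0:
--         return 0
--     m = len(A[0])
--     counts = [0] * m
--     for fila in A:
--         for j in range(m):
--             if es_primo(fila[j]):
--                 counts[j] += 1
--     return max(counts)
-- ===== Notes on version B (the rewrite author's own statement) =====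
-- stated objective: faster
-- what changed: B tests primality with trial division only up to sqrt(n) (while i*i<=n) instead of up to n, and counts all column sums in one row-major pass over a counts array instead of one column-by-column inner scan per column, returning max(counts).
import Mathlib
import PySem

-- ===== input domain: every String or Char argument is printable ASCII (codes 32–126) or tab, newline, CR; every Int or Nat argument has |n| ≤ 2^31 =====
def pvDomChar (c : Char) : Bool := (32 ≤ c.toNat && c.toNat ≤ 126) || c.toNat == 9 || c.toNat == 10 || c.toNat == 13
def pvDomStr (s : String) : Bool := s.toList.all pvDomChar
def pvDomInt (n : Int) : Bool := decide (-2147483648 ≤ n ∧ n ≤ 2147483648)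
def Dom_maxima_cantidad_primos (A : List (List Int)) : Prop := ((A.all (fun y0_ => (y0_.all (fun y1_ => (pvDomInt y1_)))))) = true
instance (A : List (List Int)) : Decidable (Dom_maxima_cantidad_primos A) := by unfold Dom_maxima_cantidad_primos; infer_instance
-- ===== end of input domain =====

-- B: sqrt-bounded trial division and one row-major pass over a counts array (A scans column by column, trial-dividing up to n).


-- ===== PORT A =====
-- 'for i in range(2, n): if n % i == 0: return False' — i counts 2,3,…,n-1, one fuel unit per iteration
def esLoop (n : Int) : Nat → Int → Bool
  | 0, _ => true
  | fuel + 1, i => if PySem.Int.mod n i == 0 then false else esLoop n fuel (i + 1)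

def es_primo (n : Int) : Bool :=
  if n < 2 then false else esLoop n (n - 2).toNat 2

def maximo (s : List Int) : Int :=
  s.foldl (fun m e => if e > m then e else m) (PySem.List.pyGetD s 0 0)

def maxima_cantidad_primos (A : List (List Int)) : Int :=
  let largo_fila : Int := A.length
  if largo_fila == 0 then 0
  else
    let largo_columna : Int := (PySem.List.pyGetD A 0 []).length
    let lista : List Int := (PySem.List.pyRange 0 largo_columna 1).foldl
      (fun lst j =>
        let cant := (PySem.List.pyRange 0 largo_fila 1).foldl
          (fun c i =>
            if es_primo (PySem.List.pyGetD (PySem.List.pyGetD A i []) j 0) then c + 1 else c) 0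
        lst ++ [cant]) []
    maximo lista

-- ===== PORT B =====
-- the 'while i*i <= n' loop of Source B's es_primo; the fuel only makes the recursion total, one unit per iteration
def primoAux (n : Int) : Nat → Int → Bool
  | 0, _ => true
  | fuel + 1, i =>
    if i * i ≤ n then
      (if PySem.Int.mod n i == 0 then false else primoAux n fuel (i + 1))
    else true

def es_primo_alt (n : Int) : Bool :=
  if n < 2 then false else primoAux n n.toNat 2

def maxima_cantidad_primos_alt (A : List (List Int)) : Int :=
  if A.length == 0 then 0
  else
    let m : Int := (PySem.List.pyGetD A 0 []).length
    let counts : List Int := A.foldl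
      (fun cs fila =>
        (PySem.List.pyRange 0 m 1).foldl
          (fun cs j =>
            if es_primo_alt (PySem.List.pyGetD fila j 0) then
              PySem.List.pySetD cs j (PySem.List.pyGetD cs j 0 + 1)
            else cs) cs)
      (List.replicate m.toNat 0)
    (PySem.List.max? counts (fun y => y)).getD 0

-- ===== PRECONDITION & SPEC =====
-- Pre_ excludes exactly the inputs where Python A raises an IndexError: a nonempty matrix whose
-- first row is empty (s[0] inside maximo on the empty count list) or with some row shorter than
-- the first row (A[i][j] out of range); Python B raises there too (ValueError resp. IndexError).
def Pre_maxima_cantidad_primos (A : List (List Int)) : Prop :=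
  A = [] ∨ (0 < (A.headD []).length ∧ ∀ r ∈ A, (A.headD []).length ≤ r.length)
instance (A : List (List Int)) : Decidable (Pre_maxima_cantidad_primos A) := by
  unfold Pre_maxima_cantidad_primos; infer_instance

def pvWitness_maxima_cantidad_primos : List (List Int) := [[2, 4], [3, 9]]

def Spec_maxima_cantidad_primos (A : List (List Int)) (out : Int) : Prop := out = maxima_cantidad_primos_alt A
instance (A : List (List Int)) (out : Int) : Decidable (Spec_maxima_cantidad_primos A out) := by unfold Spec_maxima_cantidad_primos; infer_instance

-- ===== CLAIM (what is proved, stated in full; the proofs are below) =====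
def Claim_equal_maxima_cantidad_primos : Prop := ∀ (A : List (List Int)), Dom_maxima_cantidad_primos A → Pre_maxima_cantidad_primos A → Spec_maxima_cantidad_primos A (maxima_cantidad_primos A)

-- ===== LEMMAS AND PROOFS =====

theorem esLoop_iff (n : Int) (fuel : Nat) : ∀ i : Int,
    esLoop n fuel i = true ↔ ∀ k : Int, i ≤ k → k < i + fuel → ¬ PySem.Int.mod n k = 0 := by
  induction fuel with
  | zero =>
    intro i
    simp only [esLoop, true_iff]
    intro k hk1 hk2
    exfalso; push_cast at hk2; omega
  | succ fuel ih =>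
    intro i
    simp only [esLoop]
    by_cases hm : PySem.Int.mod n i = 0
    · simp only [hm, beq_self_eq_true, if_true]
      constructor
      · intro hfalse; exact absurd hfalse (by simp)
      · intro hall; exact absurd hm (hall i le_rfl (by push_cast; omega))
    · rw [if_neg (by simpa using hm), ih (i + 1)]
      constructor
      · intro hall k hk1 hk2
        rcases eq_or_lt_of_le hk1 with rfl | hlt
        · exact hm
        · exact hall k (by omega) (by push_cast at hk2 ⊢; omega)
      · intro hall k hk1 hk2
        exact hall k (by omega) (by push_cast at hk2 ⊢; omega)

-- A's primality loop says: no divisor i with 2 ≤ i < n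
theorem es_primo_iff (n : Int) (h : 2 ≤ n) :
    es_primo n = true ↔ ∀ i : Int, 2 ≤ i → i < n → ¬ PySem.Int.mod n i = 0 := by
  unfold es_primo
  rw [if_neg (by omega), esLoop_iff n (n - 2).toNat 2]
  constructor
  · intro hall i h1 h2; exact hall i h1 (by omega)
  · intro hall i h1 h2; exact hall i h1 (by omega)

-- B's while-loop: with enough fuel it says: no divisor k ≥ i with k*k ≤ n
theorem primoAux_iff (n : Int) (fuel : Nat) (i : Int) (h2 : 2 ≤ i) (hf : n < i + fuel) :
    primoAux n fuel i = true ↔ ∀ k : Int, i ≤ k → k * k ≤ n → ¬ PySem.Int.mod n k = 0 := by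
  induction fuel generalizing i with
  | zero =>
    simp only [primoAux, true_iff]
    intro k hk hkk
    exfalso
    push_cast at hf
    have : 2 ≤ k := le_trans h2 hk
    nlinarith
  | succ fuel ih =>
    simp only [primoAux]
    by_cases hii : i * i ≤ n
    · rw [if_pos hii]
      by_cases hm : PySem.Int.mod n i = 0
      · simp only [hm, beq_self_eq_true, if_true]
        constructor
        · intro hfalse; exact absurd hfalse (by simp)
        · intro hall; exact absurd hm (hall i le_rfl hii)
      · rw [if_neg (by simpa using hm)]
        rw [ih (i + 1) (by omega) (by omega)]
        constructor
        · intro hall k hk hkk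
          rcases eq_or_lt_of_le hk with rfl | hlt
          · exact hm
          · exact hall k (by omega) hkk
        · intro hall k hk hkk; exact hall k (by omega) hkk
    · rw [if_neg hii]
      simp only [true_iff]
      intro k hk hkk
      exfalso
      have : i * i ≤ k * k := by nlinarith
      omega

-- divisor pairing: a proper divisor exists iff one of size at most sqrt n exists
theorem divisor_sqrt (n : Int) (h : 2 ≤ n) :
    (∀ i : Int, 2 ≤ i → i < n → ¬ PySem.Int.mod n i = 0) ↔
    (∀ i : Int, 2 ≤ i → i * i ≤ n → ¬ PySem.Int.mod n i = 0) := by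
  simp only [PySem.Int.mod_eq_zero_iff_dvd]
  constructor
  · intro hall i h2 hii
    exact hall i h2 (by nlinarith)
  · intro hall d h2 hdn hdvd
    rcases hdvd with ⟨c, hc⟩
    by_cases hdd : d * d ≤ n
    · exact hall d h2 hdd ⟨c, hc⟩
    · have hc2 : 2 ≤ c := by nlinarith
      have hcd : c < d := by nlinarith
      exact hall c hc2 (by nlinarith) ⟨d, by rw [hc, mul_comm]⟩

theorem es_primo_eq (n : Int) : es_primo n = es_primo_alt n := by
  by_cases h : n < 2
  · unfold es_primo es_primo_alt
    rw [if_pos h, if_pos h]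
  · rw [not_lt] at h
    have hA := es_primo_iff n h
    have hB : es_primo_alt n = true ↔
        ∀ k : Int, 2 ≤ k → k * k ≤ n → ¬ PySem.Int.mod n k = 0 := by
      unfold es_primo_alt
      rw [if_neg (by omega)]
      exact primoAux_iff n n.toNat 2 le_rfl (by omega)
    rw [Bool.eq_iff_iff, hA, hB]
    exact divisor_sqrt n h

theorem getD_lt {l : List Int} {k : Nat} (h : k < l.length) : l.getD k 0 = l[k] := by
  simp [List.getD_eq_getElem?_getD, List.getElem?_eq_getElem h]

-- one row of B's pass: increments the first m positions where the row's entry satisfies b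
theorem inner_fold (b : Int → Bool) (m : Nat) : ∀ (cs : List Int), m ≤ cs.length →
    (PySem.List.pyRange 0 (m:Int) 1).foldl
      (fun cs j => if b j then PySem.List.pySetD cs j (PySem.List.pyGetD cs j 0 + 1) else cs) cs
    = (List.range m).map (fun k => cs.getD k 0 + if b ↑k then 1 else 0) ++ cs.drop m := by
  induction m with
  | zero => intro cs h; simp [PySem.List.pyRange_one_eq_nil]
  | succ m ih =>
    intro cs h
    rw [show ((m+1:Nat):Int) = (m:Int)+1 by push_cast; ring]
    rw [PySem.List.pyRange_one_succ_right (by positivity)]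
    rw [List.foldl_append, ih cs (by omega)]
    have hm : m < cs.length := by omega
    have hdrop : cs.drop m = cs[m] :: cs.drop (m+1) := List.drop_eq_getElem_cons hm
    have hlenP : ((List.range m).map (fun k => cs.getD k 0 + if b ↑k then 1 else 0)).length = m := by simp
    simp only [List.foldl_cons, List.foldl_nil]
    have hget : PySem.List.pyGetD ((List.range m).map (fun k => cs.getD k 0 + if b ↑k then 1 else 0) ++ cs.drop m) (↑m) 0 = cs[m] := by
      rw [PySem.List.pyGetD_natCast]
      rw [hdrop]
      rw [List.getD_eq_getElem?_getD, List.getElem?_append_right (by omega)]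
      simp [List.getElem?_eq_getElem hm]
    rw [List.range_succ, List.map_append]
    by_cases hb : b ↑m
    · rw [if_pos hb, PySem.List.pySetD_natCast, hget]
      rw [List.set_append, if_neg (by omega), hdrop, hlenP, Nat.sub_self, List.set_cons_zero]
      simp [List.getElem?_eq_getElem hm, hb]
    · rw [if_neg hb]
      rw [hdrop]
      simp [hb, List.getElem?_eq_getElem hm]

-- the whole row-major pass: position k holds its start value plus the count of rows hitting column k
theorem rows_fold (q : List Int → Int → Bool) (m : Nat) :
    ∀ (rows : List (List Int)) (cs : List Int), cs.length = m →
    rows.foldl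
      (fun cs fila => (PySem.List.pyRange 0 (m:Int) 1).foldl
        (fun cs j => if q fila j then PySem.List.pySetD cs j (PySem.List.pyGetD cs j 0 + 1) else cs) cs) cs
    = (List.range m).map (fun k => cs.getD k 0 + (rows.countP (fun fila => q fila ↑k) : Int)) := by
  intro rows
  induction rows with
  | nil =>
    intro cs h
    simp only [List.foldl_nil, List.countP_nil, Nat.cast_zero, add_zero]
    apply List.ext_getElem (by simp [h])
    intro k h1 h2
    simp only [List.getElem_map, List.getElem_range]
    rw [getD_lt (by omega)]
  | cons fila rest ih =>
    intro cs h
    rw [List.foldl_cons, inner_fold (q fila) m cs (by omega)]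
    rw [show cs.drop m = [] from by simp [h], List.append_nil]
    rw [ih _ (by simp)]
    apply List.map_congr_left
    intro k hk
    have hkm : k < m := List.mem_range.mp hk
    rw [getD_lt (by simp [hkm]), List.getElem_map, List.getElem_range]
    rw [List.countP_cons]
    push_cast
    rcases Bool.eq_false_or_eq_true (q fila ↑k) with hq | hq
    · simp [hq]
      omega
    · simp [hq]

-- A's running-max loop is max(s) (with the junk value 0 on the empty list)
theorem maximo_eq_max (s : List Int) :
    maximo s = (PySem.List.max? s (fun y => y)).getD 0 := by
  cases s with
  | nil => simp [maximo, PySem.List.max?, PySem.List.pyGetD, PySem.List.pyGet?, PySem.List.pyIdx?]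
  | cons x t =>
    rw [PySem.List.max?_id_cons]
    unfold maximo
    have hx : PySem.List.pyGetD (x :: t) 0 0 = x := by
      simp [PySem.List.pyGetD, PySem.List.pyGet?, PySem.List.pyIdx?]
    rw [hx]
    have hfun : (fun (m e : Int) => if e > m then e else m) = (fun m e => max m e) := by
      funext m e
      simp only [max_def]
      split <;> split <;> omega
    rw [hfun]
    simp [List.foldl_cons, max_self]

-- the two ports agree on every input (Pre_ is only needed for the PYTHON programs not to raise)
theorem ports_eq (A : List (List Int)) :
    maxima_cantidad_primos A = maxima_cantidad_primos_alt A := by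
  cases A with
  | nil => rfl
  | cons a t =>
    have hA0 : PySem.List.pyGetD (a :: t) 0 [] = a := by
      simp [PySem.List.pyGetD, PySem.List.pyGet?, PySem.List.pyIdx?]
    unfold maxima_cantidad_primos maxima_cantidad_primos_alt
    simp only [hA0, List.length_cons]
    rw [if_neg (by simp; omega), if_neg (by simp)]
    -- B side: counts array characterization
    rw [rows_fold (fun fila j => es_primo_alt (PySem.List.pyGetD fila j 0)) a.length (a :: t)
      (List.replicate (↑a.length : Int).toNat 0) (by simp)]
    rw [PySem.List.foldl_append_singleton_eq_map]
    rw [← maximo_eq_max]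
    congr 1
    rw [List.nil_append]
    apply List.ext_getElem (by simp [PySem.List.length_pyRange_one])
    intro k h1 h2
    simp only [List.getElem_map, PySem.List.getElem_pyRange_one, List.getElem_range]
    rw [show ((0:Int) + ↑k) = (↑k:Int) by ring]
    rw [show ((t.length+1 : Nat):Int) = ((a::t).length : Int) by simp]
    rw [PySem.List.foldl_pyRange_zero_pyGetD' (a :: t) ([] : List Int) (fun c row => if es_primo (PySem.List.pyGetD row ↑k 0) then c + 1 else c) 0]
    rw [PySem.List.foldl_if_add_one]
    simp [es_primo_eq, List.getD_eq_getElem?_getD, List.getElem?_replicate]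
    split <;> rfl

-- ===== VERDICT (by name: the statement is the Claim_ definition above) =====
theorem maxima_cantidad_primos_spec : Claim_equal_maxima_cantidad_primos := by
  unfold Claim_equal_maxima_cantidad_primos
  intro A _ _
  unfold Spec_maxima_cantidad_primos
  exact ports_eq A
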